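-- pv_equiv track=rewrite | github.com/vladura4ok/MRTI2920 | Задачи/Задача 5/norm5.py | max_of_brakets
-- ===== SOURCE A (Python) =====
-- def max_of_brakets(string):
--     max_of_brakets = 0
--     list_of_brakets = []
--     for i in string:
--         if i == "(":
--             max_of_brakets += 1
--         elif i == ")":
--             list_of_brakets.append(max_of_brakets)
--             max_of_brakets = 0
--     return max(list_of_brakets)
-- ===== SOURCE B (Python) =====
-- def max_of_brakets(string):
--     return max(p.count("(") for p in string.split(")")[:-1])
-- ===== Notes on version B (the rewrite author's own statement) =====
-- stated objective: simpler
-- what changed: Replaces A's character-by-character accumulator-and-append loop with a one-line segment decomposition: split the string on ')', drop the trailing segment, count '(' in each remaining segment, and take the max.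
import Mathlib
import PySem

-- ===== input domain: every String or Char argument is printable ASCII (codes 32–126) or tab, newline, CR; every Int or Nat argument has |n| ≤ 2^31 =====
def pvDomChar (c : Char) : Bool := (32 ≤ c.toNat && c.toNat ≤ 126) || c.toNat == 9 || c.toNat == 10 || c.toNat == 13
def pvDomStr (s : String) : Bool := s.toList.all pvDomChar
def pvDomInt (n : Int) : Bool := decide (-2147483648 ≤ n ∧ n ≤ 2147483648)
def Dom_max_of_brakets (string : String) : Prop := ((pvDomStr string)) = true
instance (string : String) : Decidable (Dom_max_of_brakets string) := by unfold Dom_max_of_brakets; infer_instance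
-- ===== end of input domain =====

-- ===== PORT A =====
-- B replaces A's character-by-character accumulator loop with split-on-')' / count / max (objective: simpler).
-- Port of A: fold over the characters carrying (running count, recorded list); max() of an empty
-- list raises ValueError in Python — Pre_ excludes exactly those inputs (no ')'), the port returns 0 there.
def max_of_brakets (string : String) : Int :=
  match PySem.List.max?
      (string.toList.foldl
        (fun (st : Int × List Int) i =>
          if i = '(' then (st.1 + 1, st.2)
          else if i = ')' then ((0 : Int), st.2 ++ [st.1])
          else st) ((0 : Int), ([] : List Int))).2
      (fun x => x) with
  | some m => m
  | none => 0

-- ===== PORT B =====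
-- max(p.count("(") for p in string.split(")")[:-1]); same ValueError on no ')' (Pre_), port returns 0 there.
def max_of_brakets_alt (string : String) : Int :=
  match PySem.List.max?
      (((PySem.Chars.splitOn string.toList [')']).dropLast).map
        (fun p => (PySem.Chars.count p ['('] : Int)))
      (fun x => x) with
  | some m => m
  | none => 0

-- ===== PRECONDITION & SPEC =====
-- Pre_: the string contains at least one ')'; otherwise Python's max([]) raises ValueError in BOTH A and B.
def Pre_max_of_brakets (string : String) : Prop := ')' ∈ string.toList
instance (string : String) : Decidable (Pre_max_of_brakets string) := by
  unfold Pre_max_of_brakets; infer_instance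
def pvWitness_max_of_brakets : String := "(())()"
def Spec_max_of_brakets (string : String) (out : Int) : Prop := out = max_of_brakets_alt string
instance (string : String) (out : Int) : Decidable (Spec_max_of_brakets string out) := by
  unfold Spec_max_of_brakets; infer_instance

-- ===== CLAIM (what is proved, stated in full; the proofs are below) =====
def Claim_equal_max_of_brakets : Prop := ∀ (string : String), Dom_max_of_brakets string → Pre_max_of_brakets string → Spec_max_of_brakets string (max_of_brakets string)

-- ===== LEMMAS AND PROOFS =====

def pvSplit : List Char → List (List Char)
  | [] => [[]]
  | c :: cs => if c = ')' then [] :: pvSplit cs else (pvSplit cs).modifyHead (c :: ·)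

lemma pvSplit_ne_nil (l : List Char) : pvSplit l ≠ [] := by
  induction l with
  | nil => simp [pvSplit]
  | cons c cs ih =>
    simp only [pvSplit]
    split
    · simp
    · cases h : pvSplit cs with
      | nil => exact absurd h ih
      | cons s r => simp [List.modifyHead]

lemma pvGoSplit (fuel : Nat) : ∀ (l cur : List Char) (acc : List (List Char)), l.length ≤ fuel →
    PySem.Chars.splitOn.go [')'] fuel l cur acc
      = acc.reverse ++ (pvSplit l).modifyHead (cur.reverse ++ ·) := by
  induction fuel with
  | zero =>
    intro l cur acc h
    have : l = [] := by cases l <;> simp_all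
    subst this
    simp [PySem.Chars.splitOn.go, pvSplit]
  | succ n ih =>
    intro l cur acc h
    cases l with
    | nil => simp [PySem.Chars.splitOn.go, pvSplit]
    | cons c rest =>
      rw [PySem.Chars.splitOn.go]
      by_cases hc : c = ')'
      · subst hc
        have hpre : List.isPrefixOf [')'] (')' :: rest) = true := by simp [List.isPrefixOf]
        rw [if_pos hpre]
        have hd : List.drop [')'].length (')' :: rest) = rest := rfl
        rw [hd, ih rest [] _ (by simpa using h)]
        simp only [pvSplit, List.reverse_cons, List.reverse_nil, List.nil_append]
        rw [show (fun x : List Char => x) = id from rfl, List.modifyHead_id]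
        simp [List.modifyHead]
      · have hpre : List.isPrefixOf [')'] (c :: rest) = false := by
          cases hb : (')' == c) <;> simp_all [List.isPrefixOf]
          exact fun h' => hc h'.symm
        rw [if_neg (by simp [hpre]), ih rest (c :: cur) _ (by simpa using h)]
        simp only [pvSplit, if_neg hc]
        obtain ⟨s, r, hs⟩ : ∃ s r, pvSplit rest = s :: r := by
          cases h' : pvSplit rest with
          | nil => exact absurd h' (pvSplit_ne_nil rest)
          | cons s r => exact ⟨s, r, rfl⟩
        simp [hs, List.modifyHead]

lemma pvSplitOn_eq (l : List Char) : PySem.Chars.splitOn l [')'] = pvSplit l := by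
  rw [PySem.Chars.splitOn]
  rw [pvGoSplit (l.length + 1) l [] [] (by omega)]
  rw [show (fun x : List Char => [].reverse ++ x) = id by funext x; simp, List.modifyHead_id]
  simp

lemma pvGoCount (fuel : Nat) : ∀ (l : List Char) (acc : Nat), l.length ≤ fuel →
    PySem.Chars.count.go ['('] fuel l acc = acc + l.count '(' := by
  induction fuel with
  | zero =>
    intro l acc h
    have : l = [] := by cases l <;> simp_all
    subst this
    simp [PySem.Chars.count.go]
  | succ n ih =>
    intro l acc h
    cases l with
    | nil => simp [PySem.Chars.count.go]
    | cons c rest =>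
      rw [PySem.Chars.count.go]
      by_cases hc : c = '('
      · subst hc
        have hpre : List.isPrefixOf ['('] ('(' :: rest) = true := by simp [List.isPrefixOf]
        rw [if_pos hpre]
        have hd : List.drop ['('].length ('(' :: rest) = rest := rfl
        rw [hd, ih rest (acc + 1) (by simpa using h)]
        simp
        omega
      · have hpre : List.isPrefixOf ['('] (c :: rest) = false := by
          cases hb : ('(' == c) <;> simp_all [List.isPrefixOf]
          exact fun h' => hc h'.symm
        rw [if_neg (by simp [hpre]), ih rest acc (by simpa using h)]
        simp [hc]

lemma pvCount_eq (l : List Char) : PySem.Chars.count l ['('] = l.count '(' := by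
  rw [PySem.Chars.count, if_neg (by simp), pvGoCount l.length l 0 le_rfl]
  simp

lemma pvFoldSnd (cs : List Char) : ∀ (c0 : Int) (l0 : List Int),
    (cs.foldl (fun (st : Int × List Int) i =>
        if i = '(' then (st.1 + 1, st.2)
        else if i = ')' then ((0 : Int), st.2 ++ [st.1])
        else st) (c0, l0)).2
      = l0 ++ (match (pvSplit cs).dropLast with
          | [] => []
          | s :: rest => (c0 + (s.count '(' : Int)) :: rest.map (fun p => ((p.count '(' : Int)))) := by
  induction cs with
  | nil => intro c0 l0; simp [pvSplit]
  | cons c cs ih =>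
    intro c0 l0
    by_cases hc : c = ')'
    · subst hc
      simp only [List.foldl_cons]
      rw [if_neg (by decide), if_pos trivial, ih 0 (l0 ++ [c0])]
      obtain ⟨s, r, hs⟩ : ∃ s r, pvSplit cs = s :: r := by
        cases h' : pvSplit cs with
        | nil => exact absurd h' (pvSplit_ne_nil cs)
        | cons s r => exact ⟨s, r, rfl⟩
      simp only [pvSplit, hs]
      cases r with
      | nil => simp
      | cons s' r' =>
        simp [List.dropLast_cons_of_ne_nil]
    · obtain ⟨s, r, hs⟩ : ∃ s r, pvSplit cs = s :: r := by
        cases h' : pvSplit cs with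
        | nil => exact absurd h' (pvSplit_ne_nil cs)
        | cons s r => exact ⟨s, r, rfl⟩
      have hcount : ((c :: s).count '(' : Int) = (if c = '(' then 1 else 0) + (s.count '(' : Int) := by
        by_cases h : c = '(' <;> simp [h] <;> push_cast <;> ring
      by_cases hp : c = '('
      · subst hp
        simp only [List.foldl_cons]
        rw [if_pos trivial, ih (c0 + 1) l0]
        simp only [pvSplit, if_neg hc, hs, List.modifyHead]
        cases r with
        | nil => simp
        | cons s' r' =>
          simp only [List.dropLast_cons₂]
          rw [hcount]
          congr 1
          · simp
            ring
      · simp only [List.foldl_cons, if_neg hp, if_neg hc]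
        rw [ih c0 l0]
        simp only [pvSplit, if_neg hc, hs, List.modifyHead]
        cases r with
        | nil => simp
        | cons s' r' =>
          simp only [List.dropLast_cons₂]
          rw [hcount]
          congr 1
          simp [hp]


lemma pvLists_eq (s : String) :
    (s.toList.foldl
      (fun (st : Int × List Int) i =>
        if i = '(' then (st.1 + 1, st.2)
        else if i = ')' then ((0 : Int), st.2 ++ [st.1])
        else st) ((0 : Int), ([] : List Int))).2
    = ((PySem.Chars.splitOn s.toList [')']).dropLast).map
        (fun p => (PySem.Chars.count p ['('] : Int)) := by
  rw [pvFoldSnd s.toList 0 [], pvSplitOn_eq]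
  have hmap : ∀ l : List (List Char),
      l.map (fun p => (PySem.Chars.count p ['('] : Int)) = l.map (fun p => (p.count '(' : Int)) := by
    intro l; exact List.map_congr_left (fun p _ => by rw [pvCount_eq])
  rw [hmap]
  cases h : (pvSplit s.toList).dropLast with
  | nil => simp
  | cons a r => simp

-- ===== VERDICT (by name: the statement is the Claim_ definition above) =====
theorem max_of_brakets_spec : Claim_equal_max_of_brakets := by
  intro s _ _
  unfold Spec_max_of_brakets max_of_brakets max_of_brakets_alt
  rw [pvLists_eq s]
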